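-- pv_equiv track=rewrite | github.com/Amazingman09/python-mini-projects | merging_macros/macro.py | parse_recording_lines
-- ===== SOURCE A (Python) =====
-- def parse_recording_lines(lines):
--     """Parse an iterable of recording lines (strings) and return the same
--     output as :func:`parse_recording`.  This is useful for testing or for
--     when you already have the lines in memory rather than in a file.
--
--     Example::
--
--         >>> lines = ['KEY_DOWN|0|e', 'KEY_UP|316|e', 'KEY_DOWN|20|t']
--         >>> parse_recording_lines(lines)
--         [(0, 'KEY_DOWN:e'), (316, 'KEY_UP:e'), (336, 'KEY_DOWN:t')]
--     """
--
--     events = []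
--     time = 0
--     for line in lines:
--         line = line.strip()
--         if not line:
--             continue
--         if line.startswith('#'):
--             line = line[1:].lstrip()
--             if not line:
--                 continue
--         parts = line.split('|', 2)
--         if len(parts) < 3:
--             continue
--         typ, dur, data = parts
--         try:
--             dt = int(dur)
--         except ValueError:
--             dt = 0
--         time += dt
--         events.append((time, f"{typ}:{data}"))
--     return events
-- ===== SOURCE B (Python) =====
-- from itertools import accumulate
--
--
-- def _parse_line(line):
--     """Return (typ, dt, data) for a meaningful line, or None if it is skipped."""
--     line = line.strip()
--     if line.startswith('#'):
--         line = line[1:].lstrip()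
--     if not line:
--         return None
--     parts = line.split('|', 2)
--     if len(parts) < 3:
--         return None
--     typ, dur, data = parts
--     try:
--         dt = int(dur)
--     except ValueError:
--         dt = 0
--     return (typ, dt, data)
--
--
-- def parse_recording_lines(lines):
--     parsed = [p for p in map(_parse_line, lines) if p is not None]
--     times = accumulate(dt for _, dt, _ in parsed)
--     return [(t, f"{typ}:{data}") for t, (typ, _, data) in zip(times, parsed)]
-- ===== Notes on version B (the rewrite author's own statement) =====
-- stated objective: alternative
-- what changed: Replaces A's single loop with an in-loop running total by a two-pass pipeline: one pass parses/filters lines into (typ, dt, data) triples, then itertools.accumulate computes the prefix-sum timestamps which are zipped back with the formatted events.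
import Mathlib
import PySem

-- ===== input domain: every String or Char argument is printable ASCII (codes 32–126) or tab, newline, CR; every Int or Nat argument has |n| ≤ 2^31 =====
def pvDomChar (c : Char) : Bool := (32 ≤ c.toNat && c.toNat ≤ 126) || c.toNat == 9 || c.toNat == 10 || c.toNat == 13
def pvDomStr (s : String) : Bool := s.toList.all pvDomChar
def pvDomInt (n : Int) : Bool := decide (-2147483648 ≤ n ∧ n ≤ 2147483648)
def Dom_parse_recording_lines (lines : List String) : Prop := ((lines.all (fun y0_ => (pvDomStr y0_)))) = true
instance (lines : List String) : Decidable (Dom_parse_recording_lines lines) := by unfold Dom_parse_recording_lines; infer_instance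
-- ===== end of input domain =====

-- B separates parsing/filtering (one pass producing (typ, dt, data) triples) from the
-- timestamping (a prefix-sum pass zipped back); objective: alternative decomposition, same cost.

-- ===== PORT A =====
-- split/unpack/int/append part of A's loop body (reached after the skip guards)
def pvA_process (events : List (Int × String)) (time : Int) (line : String) :
    List (Int × String) × Int :=
  match (PySem.Str.splitMax? line "|" 2).getD [] with
  | [typ, dur, data] =>
      let dt := (PySem.Int.ofStr? dur).getD 0
      (events ++ [(time + dt, typ ++ ":" ++ data)], time + dt)
  | _ => (events, time)   -- len(parts) < 3: continue

def pvA_step (st : List (Int × String) × Int) (line : String) :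
    List (Int × String) × Int :=
  let line1 := PySem.Str.strip line
  if line1 = "" then st
  else if PySem.Str.startswith line1 "#" then
    let line2 := PySem.Str.lstrip (PySem.Str.slice line1 (some 1) none)
    if line2 = "" then st else pvA_process st.1 st.2 line2
  else pvA_process st.1 st.2 line1

def parse_recording_lines (lines : List String) : List (Int × String) :=
  (lines.foldl pvA_step ([], 0)).1

-- ===== PORT B =====
def pvB_parseLine (line : String) : Option (String × Int × String) :=
  let l1 := PySem.Str.strip line
  let l2 := if PySem.Str.startswith l1 "#" then
              PySem.Str.lstrip (PySem.Str.slice l1 (some 1) none)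
            else l1
  if l2 = "" then none
  else match (PySem.Str.splitMax? l2 "|" 2).getD [] with
  | [typ, dur, data] => some (typ, (PySem.Int.ofStr? dur).getD 0, data)
  | _ => none

-- port of itertools.accumulate (running sums)
def pvB_accAux (s : Int) : List Int → List Int
  | [] => []
  | x :: xs => (s + x) :: pvB_accAux (s + x) xs

def parse_recording_lines_alt (lines : List String) : List (Int × String) :=
  let parsed := (lines.map pvB_parseLine).filterMap id
  let times := pvB_accAux 0 (parsed.map (fun p => p.2.1))
  (times.zip parsed).map (fun tp => (tp.1, tp.2.1 ++ ":" ++ tp.2.2.2))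

-- ===== PRECONDITION & SPEC =====
def Spec_parse_recording_lines (lines : List String) (out : List (Int × String)) : Prop := out = parse_recording_lines_alt lines
instance (lines : List String) (out : List (Int × String)) : Decidable (Spec_parse_recording_lines lines out) := by unfold Spec_parse_recording_lines; infer_instance

-- ===== CLAIM (what is proved, stated in full; the proofs are below) =====
def Claim_equal_parse_recording_lines : Prop := ∀ (lines : List String), Dom_parse_recording_lines lines → Spec_parse_recording_lines lines (parse_recording_lines lines)

-- ===== LEMMAS AND PROOFS =====

-- B's tail of the pipeline, as a function of the start time and the parsed triples
def pvEmit (time : Int) (ps : List (String × Int × String)) : List (Int × String) :=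
  ((pvB_accAux time (ps.map (fun p => p.2.1))).zip ps).map
    (fun tp => (tp.1, tp.2.1 ++ ":" ++ tp.2.2.2))

theorem pvEmit_nil (time : Int) : pvEmit time [] = [] := rfl

theorem pvEmit_cons (time : Int) (p : String × Int × String) (ps : List (String × Int × String)) :
    pvEmit time (p :: ps) = (time + p.2.1, p.1 ++ ":" ++ p.2.2) :: pvEmit (time + p.2.1) ps := rfl

-- A's loop body, characterised by B's line parser
theorem pvA_step_eq (st : List (Int × String) × Int) (line : String) :
    pvA_step st line = match pvB_parseLine line with
      | none => st
      | some p => (st.1 ++ [(st.2 + p.2.1, p.1 ++ ":" ++ p.2.2)], st.2 + p.2.1) := by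
  unfold pvA_step pvB_parseLine
  by_cases h1 : PySem.Str.strip line = ""
  · rw [h1]
    have hsw : PySem.Chars.startswith ([] : List Char) ['#'] = false := rfl
    simp [hsw]
  · by_cases h2 : PySem.Str.startswith (PySem.Str.strip line) "#"
    · simp only [h1, h2, if_true]
      by_cases h3 : PySem.Str.lstrip (PySem.Str.slice (PySem.Str.strip line) (some 1) none) = ""
      · simp [h3]
      · simp only [h3]
        unfold pvA_process
        cases hpp : (PySem.Str.splitMax?
            (PySem.Str.lstrip (PySem.Str.slice (PySem.Str.strip line) (some 1) none)) "|" 2).getD [] with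
        | nil => simp
        | cons a t =>
          cases t with
          | nil => simp
          | cons b t2 =>
            cases t2 with
            | nil => simp
            | cons c t3 => cases t3 <;> simp
    · simp only [h1, h2, Bool.false_eq_true, if_false]
      unfold pvA_process
      cases hpp : (PySem.Str.splitMax? (PySem.Str.strip line) "|" 2).getD [] with
      | nil => simp
      | cons a t =>
        cases t with
        | nil => simp
        | cons b t2 =>
          cases t2 with
          | nil => simp
          | cons c t3 => cases t3 <;> simp

theorem pv_key (ls : List String) :
    ∀ (events : List (Int × String)) (time : Int),
      (ls.foldl pvA_step (events, time)).1 = events ++ pvEmit time (ls.filterMap pvB_parseLine) := by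
  induction ls with
  | nil => intro events time; simp [pvEmit_nil]
  | cons l t ih =>
    intro events time
    rw [List.foldl_cons, pvA_step_eq]
    cases hp : pvB_parseLine l with
    | none => simp only [List.filterMap_cons, hp]; exact ih events time
    | some p =>
      simp only [List.filterMap_cons, hp, pvEmit_cons]
      rw [ih (events ++ [(time + p.2.1, p.1 ++ ":" ++ p.2.2)]) (time + p.2.1)]
      simp

-- ===== VERDICT (by name: the statement is the Claim_ definition above) =====
set_option maxHeartbeats 1000000 in
theorem pv_alt_eq (lines : List String) :
    parse_recording_lines_alt lines = pvEmit 0 (lines.filterMap pvB_parseLine) := by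
  have h : (lines.map pvB_parseLine).filterMap id = lines.filterMap pvB_parseLine := by
    simp only [List.filterMap_map, Function.comp_def, id_eq]
  simp only [parse_recording_lines_alt, pvEmit, h]

theorem parse_recording_lines_spec : Claim_equal_parse_recording_lines := by
  intro lines _
  show parse_recording_lines lines = parse_recording_lines_alt lines
  rw [pv_alt_eq]
  have h := pv_key lines [] 0
  simpa [parse_recording_lines] using h
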